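-- pv_equiv track=rewrite | github.com/MUKAMAFrancois/ChosenPython | python/courses/beginner/challenges/codeSignal/Solutions/codeSignal1.py | solution
-- ===== SOURCE A (Python) =====
-- def solution(a):
--     # Create a list to store the trees
--     trees = []
--     # Create a list to store the people
--     people = []
--
--     # Separate the trees and people
--     for height in a:
--         if height == -1:
--             trees.append(-1)
--         else:
--             people.append(height)
--
--     # Sort the people in non-descending order
--     people.sort()
--
--     # Construct the new list by interleaving trees and people
--     result = []
--     tree_index = 0
--     people_index = 0
--
--     for height in a:
--         if height == -1:
--             result.append(-1)
--             tree_index += 1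
--         else:
--             result.append(people[people_index])
--             people_index += 1
--
--     return result
-- ===== SOURCE B (Python) =====
-- def solution(a):
--     # Selection approach: no sort call. Keep the multiset of remaining people;
--     # at each person slot, extract the minimum remaining person.
--     rest = [h for h in a if h != -1]
--     out = []
--     for h in a:
--         if h == -1:
--             out.append(-1)
--         else:
--             m = min(rest)
--             out.append(m)
--             rest.remove(m)
--     return out
-- ===== Notes on version B (the rewrite author's own statement) =====
-- stated objective: alternative
-- what changed: B never sorts: it keeps the multiset of remaining people and, in a single rebuild pass, extracts the minimum remaining person at each person slot (selection by repeated min/remove), instead of A's partition-sort-interleave.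
import Mathlib
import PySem

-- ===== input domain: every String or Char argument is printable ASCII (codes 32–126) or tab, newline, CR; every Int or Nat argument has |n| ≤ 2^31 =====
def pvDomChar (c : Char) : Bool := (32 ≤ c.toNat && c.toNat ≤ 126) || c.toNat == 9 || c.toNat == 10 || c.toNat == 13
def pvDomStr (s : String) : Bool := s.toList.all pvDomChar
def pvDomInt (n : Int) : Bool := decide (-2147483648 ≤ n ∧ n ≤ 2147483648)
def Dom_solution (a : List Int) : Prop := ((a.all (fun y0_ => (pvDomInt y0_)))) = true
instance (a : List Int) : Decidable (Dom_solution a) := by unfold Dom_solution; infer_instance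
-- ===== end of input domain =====

-- B replaces A's partition-sort-interleave with a sort-free selection pass: it keeps the
-- multiset of remaining people and extracts the minimum remaining person at each person slot.

-- ===== PORT A =====
-- A: partition into trees/people, sort people, rebuild by interleaving with running counters.
def solution (a : List Int) : List Int :=
  let tp := a.foldl (fun (s : List Int × List Int) h =>
      if h = -1 then (s.1 ++ [(-1 : Int)], s.2) else (s.1, s.2 ++ [h])) ([], [])
  let people := PySem.List.sorted tp.2 (fun x => x) false
  -- second loop: state (result, tree_index, people_index); people[people_index] is
  -- always in range here, so pyGetD is exact
  let fin := a.foldl (fun (s : List Int × Int × Int) h =>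
      if h = -1 then (s.1 ++ [(-1 : Int)], s.2.1 + 1, s.2.2)
      else (s.1 ++ [PySem.List.pyGetD people s.2.2 0], s.2.1, s.2.2 + 1)) ([], 0, 0)
  fin.1

-- ===== PORT B =====
-- B: rest = remaining people; one pass over a, emitting -1 at tree slots and
-- min(rest) (then removed from rest) at person slots. rest is never empty at a
-- person slot, so min?/remove? are exact (getD defaults are unreachable).
def solution_alt (a : List Int) : List Int :=
  let rest := a.filter (fun h => decide (h ≠ -1))
  (a.foldl (fun (s : List Int × List Int) h =>
      if h = -1 then (s.1 ++ [(-1 : Int)], s.2)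
      else
        let m := (PySem.List.min? s.2 (fun x => x)).getD 0
        (s.1 ++ [m], (PySem.List.remove? s.2 m).getD s.2)) ([], rest)).1

-- ===== PRECONDITION & SPEC =====
def Spec_solution (a : List Int) (out : List Int) : Prop := out = solution_alt a
instance (a : List Int) (out : List Int) : Decidable (Spec_solution a out) := by unfold Spec_solution; infer_instance

-- ===== CLAIM (what is proved, stated in full; the proofs are below) =====
def Claim_equal_solution : Prop := ∀ (a : List Int), Dom_solution a → Spec_solution a (solution a)

-- ===== LEMMAS AND PROOFS =====

-- common reference: walk a, keep -1, else consume the next element of p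
def pvMerge : List Int → List Int → List Int
  | [], _ => []
  | h :: t, p => if h = -1 then -1 :: pvMerge t p else p.headD 0 :: pvMerge t p.tail

theorem pv_foldA (a : List Int) (p : List Int) :
    ∀ (res : List Int) (ti : Int) (pi : Nat),
    (a.foldl (fun (s : List Int × Int × Int) h =>
      if h = -1 then (s.1 ++ [(-1 : Int)], s.2.1 + 1, s.2.2)
      else (s.1 ++ [PySem.List.pyGetD p s.2.2 0], s.2.1, s.2.2 + 1)) (res, ti, (pi : Int))).1
    = res ++ pvMerge a (p.drop pi) := by
  induction a with
  | nil => intro res ti pi; simp [pvMerge]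
  | cons h t ih =>
    intro res ti pi
    by_cases hh : h = -1
    · rw [List.foldl_cons, if_pos hh, ih]
      simp [pvMerge, hh]
    · rw [List.foldl_cons, if_neg hh,
        show ((pi : Int) + 1) = ((pi + 1 : Nat) : Int) by push_cast; ring, ih]
      simp [pvMerge, hh, PySem.List.pyGetD_natCast, ← List.tail_drop]

theorem pv_people (a : List Int) :
    ∀ (ts ps : List Int),
    (a.foldl (fun (s : List Int × List Int) h =>
      if h = -1 then (s.1 ++ [(-1 : Int)], s.2) else (s.1, s.2 ++ [h])) (ts, ps)).2
    = ps ++ a.filter (fun h => decide (h ≠ -1)) := by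
  induction a with
  | nil => intro ts ps; simp
  | cons h t ih =>
    intro ts ps
    by_cases hh : h = -1
    · simp [hh, ih]
    · simp [hh, ih]

-- the sorted list of a nonempty multiset is its minimum followed by the sorted remainder
theorem pv_sorted_min_cons (rest : List Int) (hne : rest ≠ []) :
    PySem.List.sorted rest (fun x => x) false
      = ((PySem.List.min? rest (fun x => x)).getD 0) ::
        PySem.List.sorted
          (rest.erase ((PySem.List.min? rest (fun x => x)).getD 0)) (fun x => x) false := by
  obtain ⟨m, hm⟩ : ∃ m, PySem.List.min? rest (fun x => x) = some m := by
    cases hmin : PySem.List.min? rest (fun x => x) with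
    | none => exact absurd ((PySem.List.min?_eq_none_iff _ _).mp hmin) hne
    | some m => exact ⟨m, rfl⟩
  rw [hm]; simp only [Option.getD_some]
  have hmem : m ∈ rest := PySem.List.min?_mem hm
  have hmin := PySem.List.min?_isMin hm
  cases hs : PySem.List.sorted rest (fun x => x) false with
  | nil => exact absurd ((PySem.List.sorted_eq_nil_iff _ _ _).mp hs) hne
  | cons h t =>
    have hperm : (h :: t).Perm rest := hs ▸ PySem.List.sorted_perm rest (fun x => x) false
    have hhm : h = m := by
      have h1 : h ≤ m := PySem.List.key_head_sorted_le _ _ hs m hmem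
      have h2 : m ≤ h := hmin h (hperm.mem_iff.mp (List.mem_cons_self ..))
      omega
    subst hhm
    congr 1
    have hpw : (h :: t).Pairwise (fun a b => a ≤ b) := by
      have := PySem.List.sorted_pairwise rest (fun x => x)
      rw [hs] at this; exact this
    exact (PySem.List.sorted_id_eq_of_perm_of_pairwise _ _
      (by simpa using hperm.erase h) hpw.of_cons).symm

theorem pv_foldB (a : List Int) :
    ∀ (out rest : List Int), a.countP (fun h => decide (h ≠ -1)) ≤ rest.length →
    (a.foldl (fun (s : List Int × List Int) h =>
      if h = -1 then (s.1 ++ [(-1 : Int)], s.2)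
      else
        let m := (PySem.List.min? s.2 (fun x => x)).getD 0
        (s.1 ++ [m], (PySem.List.remove? s.2 m).getD s.2)) (out, rest)).1
    = out ++ pvMerge a (PySem.List.sorted rest (fun x => x) false) := by
  induction a with
  | nil => intro out rest _; simp [pvMerge]
  | cons h t ih =>
    intro out rest hlen
    by_cases hh : h = -1
    · rw [List.foldl_cons, if_pos hh, ih _ _ (by
        rw [List.countP_cons, if_neg (by simp [hh])] at hlen; omega)]
      simp [pvMerge, hh]
    · have hcnt : t.countP (fun h => decide (h ≠ -1)) + 1 ≤ rest.length := by
        rw [List.countP_cons, if_pos (by simp [hh])] at hlen; omega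
      have hne : rest ≠ [] := by intro h0; subst h0; simp at hcnt
      obtain ⟨m, hm⟩ : ∃ m, PySem.List.min? rest (fun x => x) = some m := by
        cases hmin : PySem.List.min? rest (fun x => x) with
        | none => exact absurd ((PySem.List.min?_eq_none_iff _ _).mp hmin) hne
        | some m => exact ⟨m, rfl⟩
      have hmem : m ∈ rest := PySem.List.min?_mem hm
      rw [List.foldl_cons, if_neg hh]
      simp only [hm, Option.getD_some, PySem.List.remove?_eq_some_erase rest m hmem]
      rw [ih _ _ (by rw [List.length_erase_of_mem hmem]; omega),
        pv_sorted_min_cons rest hne, hm]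
      simp [pvMerge, hh]

-- ===== VERDICT (by name: the statement is the Claim_ definition above) =====
theorem solution_spec : Claim_equal_solution := by
  intro a _
  unfold Spec_solution solution solution_alt
  have hpeople := pv_people a [] []
  have hA := pv_foldA a
    (PySem.List.sorted ((a.foldl (fun (s : List Int × List Int) h =>
      if h = -1 then (s.1 ++ [(-1 : Int)], s.2) else (s.1, s.2 ++ [h])) ([], [])).2)
      (fun x => x) false) [] 0 0
  simp only [List.nil_append, Int.natCast_zero] at hpeople hA
  rw [hA, hpeople, List.drop_zero,
    pv_foldB a [] (a.filter (fun h => decide (h ≠ -1))) (by rw [List.countP_eq_length_filter]),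
    List.nil_append]
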